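-- pv_equiv track=rewrite | github.com/SprocketLab/slop-code-bench | src/slop_code/execution/file_ops/structured_files.py | _deduce_columns
-- ===== SOURCE A (Python) =====
-- from typing import Any
--
-- def _deduce_columns(rows: list[dict[str, Any]]) -> list[str]:
--     ordered_columns: list[str] = []
--     seen: set[str] = set()
--     for row in rows:
--         for column in row.keys():
--             if column not in seen:
--                 seen.add(column)
--                 ordered_columns.append(column)
--     return ordered_columns
-- ===== SOURCE B (Python) =====
-- def _deduce_columns(rows):
--     keys = [k for row in rows for k in row]
--     first = {k: i for i, k in reversed(list(enumerate(keys)))}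
--     return sorted(first, key=first.get)
-- ===== Notes on version B (the rewrite author's own statement) =====
-- stated objective: alternative
-- what changed: Instead of one pass maintaining a seen-set and a parallel ordered list, B flattens all keys, builds a first-occurrence-index dict with a reverse comprehension over enumerate, and sorts the distinct keys by that index.
import Mathlib
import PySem

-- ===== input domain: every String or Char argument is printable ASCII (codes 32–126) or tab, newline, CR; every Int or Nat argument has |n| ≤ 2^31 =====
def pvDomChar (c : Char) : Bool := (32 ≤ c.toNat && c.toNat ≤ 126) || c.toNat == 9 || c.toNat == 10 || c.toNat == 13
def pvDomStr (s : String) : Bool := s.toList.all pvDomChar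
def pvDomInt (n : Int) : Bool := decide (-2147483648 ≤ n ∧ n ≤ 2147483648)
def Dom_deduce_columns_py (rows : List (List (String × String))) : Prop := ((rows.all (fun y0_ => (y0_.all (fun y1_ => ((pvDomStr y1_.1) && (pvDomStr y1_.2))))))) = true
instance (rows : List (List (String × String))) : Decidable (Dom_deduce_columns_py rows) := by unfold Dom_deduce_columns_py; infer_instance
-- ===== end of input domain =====

-- B flattens the keys, builds a first-occurrence-index map by a reverse comprehension, and
-- sorts the distinct keys by that index, instead of A's one pass with a seen-set and a
-- parallel ordered list (alternative; same linear cost).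

-- ===== PORT A =====
-- one step of A's inner loop: 'if column not in seen: seen.add(column); ordered.append(column)'
def deduceStepA (st : List String × PySem.Set String) (column : String) :
    List String × PySem.Set String :=
  if PySem.Set.contains st.2 column then st
  else (st.1 ++ [column], PySem.Set.add st.2 column)

def deduce_columns_py (rows : List (List (String × String))) : List String :=
  (rows.foldl (fun st row => (row.map (·.1)).foldl deduceStepA st) ([], PySem.Set.empty)).1

-- ===== PORT B =====
-- '{k: i for i, k in reversed(list(enumerate(keys)))}': later (= smaller-index) writes win,
-- so each key maps to its first-occurrence index; 'sorted(first, key=first.get)' — the key is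
-- injective on the dict's keys, so the result is well defined.
def deduce_columns_py_alt (rows : List (List (String × String))) : List String :=
  let keys := rows.flatMap (fun row => row.map (·.1))
  let first := ((PySem.List.enumerate keys).reverse).foldl
      (fun (d : PySem.Dict String Int) p => d.insert p.2 p.1) PySem.Dict.empty
  PySem.List.sorted first.keys (fun k => first.getD k 0)

-- ===== PRECONDITION & SPEC =====
def Spec_deduce_columns_py (rows : List (List (String × String))) (out : List String) : Prop := out = deduce_columns_py_alt rows
instance (rows : List (List (String × String))) (out : List String) : Decidable (Spec_deduce_columns_py rows out) := by unfold Spec_deduce_columns_py; infer_instance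

-- ===== CLAIM (what is proved, stated in full; the proofs are below) =====
def Claim_equal_deduce_columns_py : Prop := ∀ (rows : List (List (String × String))), Dom_deduce_columns_py rows → Spec_deduce_columns_py rows (deduce_columns_py rows)

-- ===== LEMMAS AND PROOFS =====

-- A's inner loop keeps 'ordered' and 'seen' equal and both are Set.add folds
theorem foldl_deduceStepA (ks : List String) (s : PySem.Set String) :
    ks.foldl deduceStepA (s, s) = (ks.foldl PySem.Set.add s, ks.foldl PySem.Set.add s) := by
  induction ks generalizing s with
  | nil => rfl
  | cons k ks ih =>
    simp only [List.foldl_cons, deduceStepA, PySem.Set.add]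
    split <;> simp_all

theorem foldl_rows_deduceStepA (rows : List (List (String × String))) (s : PySem.Set String) :
    rows.foldl (fun st row => (row.map (·.1)).foldl deduceStepA st) (s, s)
      = (rows.foldl (fun acc row => (row.map (·.1)).foldl PySem.Set.add acc) s,
         rows.foldl (fun acc row => (row.map (·.1)).foldl PySem.Set.add acc) s) := by
  induction rows generalizing s with
  | nil => rfl
  | cons r rows ih => simp [foldl_deduceStepA, ih]

theorem foldl_add_flatMap (rows : List (List (String × String))) (s : PySem.Set String) :
    (rows.flatMap (fun row => row.map (·.1))).foldl PySem.Set.add s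
      = rows.foldl (fun acc row => (row.map (·.1)).foldl PySem.Set.add acc) s := by
  induction rows generalizing s with
  | nil => rfl
  | cons r rows ih => simp [List.flatMap_cons, List.foldl_append, ih]

-- the fold of inserts: lookup is the LAST write, i.e. find? from the right
theorem get?_foldl_insert (ps : List (Int × String)) (d : PySem.Dict String Int) (k : String) :
    (ps.foldl (fun (d : PySem.Dict String Int) p => d.insert p.2 p.1) d).get? k
      = ((ps.reverse.find? (fun p => p.2 == k)).map (·.1)).or (d.get? k) := by
  induction ps generalizing d with
  | nil => simp
  | cons p ps ih =>
    simp only [List.foldl_cons, ih, List.reverse_cons, List.find?_append]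
    cases h : ps.reverse.find? (fun p => p.2 == k) with
    | some q => simp
    | none =>
      by_cases hk : k = p.2
      · subst hk; simp
      · have hpk : (p.2 == k) = false := by simp [Ne.symm hk]
        simp [PySem.Dict.get?_insert, hk, hpk]

theorem mem_keys_foldl_insert (ps : List (Int × String)) (d : PySem.Dict String Int) (k : String) :
    k ∈ (ps.foldl (fun (d : PySem.Dict String Int) p => d.insert p.2 p.1) d).keys
      ↔ k ∈ d.keys ∨ ∃ p ∈ ps, p.2 = k := by
  induction ps generalizing d with
  | nil => simp
  | cons p ps ih =>
    simp only [List.foldl_cons, ih, PySem.Dict.mem_keys_insert, List.mem_cons]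
    constructor
    · rintro (⟨h | h⟩ | ⟨q, hq, hqk⟩)
      · exact Or.inr ⟨p, Or.inl rfl, h.symm⟩
      · exact Or.inl h
      · exact Or.inr ⟨q, Or.inr hq, hqk⟩
    · rintro (h | ⟨q, (rfl | hq), hqk⟩)
      · exact Or.inl (Or.inr h)
      · exact Or.inl (Or.inl hqk.symm)
      · exact Or.inr ⟨q, hq, hqk⟩

theorem nodup_keys_foldl_insert (ps : List (Int × String)) (d : PySem.Dict String Int)
    (hd : d.keys.Nodup) :
    (ps.foldl (fun (d : PySem.Dict String Int) p => d.insert p.2 p.1) d).keys.Nodup := by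
  induction ps generalizing d with
  | nil => exact hd
  | cons p ps ih => exact ih _ (PySem.Dict.nodup_keys_insert _ _ _ hd)

-- snd-projection of enumerate is the list itself
theorem map_snd_enumerate (xs : List String) (i : Int) :
    (PySem.List.enumerate xs i).map (·.2) = xs := by
  induction xs generalizing i with
  | nil => rfl
  | cons x xs ih => simp [PySem.List.enumerate, ih]

-- the FIRST pair of enumerate whose snd is k carries k's first-occurrence index
theorem find?_enumerate (xs : List String) (i : Int) (k : String) (hk : k ∈ xs) :
    (PySem.List.enumerate xs i).find? (fun p => p.2 == k) = some (i + List.idxOf k xs, k) := by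
  induction xs generalizing i with
  | nil => simp at hk
  | cons x xs ih =>
    by_cases hx : x = k
    · subst hx
      simp [PySem.List.enumerate]
    · have hk' : k ∈ xs := by
        rcases List.mem_cons.1 hk with h | h
        · exact absurd h.symm hx
        · exact h
      have hxb : (x == k) = false := by simp [hx]
      simp only [PySem.List.enumerate, List.find?, ih (i + 1) hk', List.idxOf_cons, hxb,
        cond_false]
      congr 1
      push_cast
      ring_nf

-- first-occurrence dedup is strictly increasing in first-occurrence index
theorem ofList_pairwise_idxOf (keys : List String) :
    (PySem.Set.ofList keys).Pairwise (fun a b => List.idxOf a keys < List.idxOf b keys) := by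
  induction keys with
  | nil => simp [PySem.Set.ofList]
  | cons x xs ih =>
    rw [PySem.Set.ofList_cons]
    constructor
    · intro b hb
      have hbx : b ≠ x := ((PySem.Set.mem_discard _ _ _).1 hb).2
      have hx : (x == b) = false := by simp [Ne.symm hbx]
      simp [List.idxOf_cons, hx]
    · have hsub : (PySem.Set.discard (PySem.Set.ofList xs) x).Sublist (PySem.Set.ofList xs) :=
        List.filter_sublist
      refine (ih.sublist hsub).imp_of_mem ?_
      intro a b ha hb hlt
      have hax : (x == a) = false := by simp [Ne.symm ((PySem.Set.mem_discard _ _ _).1 ha).2]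
      have hbx : (x == b) = false := by simp [Ne.symm ((PySem.Set.mem_discard _ _ _).1 hb).2]
      simp only [List.idxOf_cons, hax, hbx, cond_false]
      omega

-- ===== VERDICT (by name: the statement is the Claim_ definition above) =====
theorem deduce_columns_py_spec : Claim_equal_deduce_columns_py := by
  intro rows _
  unfold Spec_deduce_columns_py deduce_columns_py deduce_columns_py_alt
  show (rows.foldl _ (PySem.Set.empty, PySem.Set.empty)).1 = _
  rw [foldl_rows_deduceStepA]
  set keys := rows.flatMap (fun row => row.map (·.1)) with hkeys
  set first := ((PySem.List.enumerate keys).reverse).foldl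
      (fun (d : PySem.Dict String Int) p => d.insert p.2 p.1) PySem.Dict.empty with hfirst
  -- lookup in 'first' is the first-occurrence index
  have hget : ∀ k ∈ keys, first.getD k 0 = (List.idxOf k keys : Int) := by
    intro k hk
    rw [hfirst, PySem.Dict.getD_eq_get?_getD, get?_foldl_insert, List.reverse_reverse,
      find?_enumerate keys 0 k hk]
    simp
  -- 'first.keys' has exactly the distinct keys
  have hmem : ∀ k, k ∈ first.keys ↔ k ∈ keys := by
    intro k
    rw [hfirst, mem_keys_foldl_insert]
    constructor
    · rintro (h | ⟨p, hp, rfl⟩)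
      · simp [PySem.Dict.keys_empty] at h
      · have := List.mem_map_of_mem (f := (·.2)) (List.mem_reverse.1 hp)
        rwa [map_snd_enumerate] at this
    · intro hk
      refine Or.inr ?_
      have : k ∈ (PySem.List.enumerate keys 0).map (·.2) := by rwa [map_snd_enumerate]
      rcases List.mem_map.1 this with ⟨p, hp, hpk⟩
      exact ⟨p, List.mem_reverse.2 hp, hpk⟩
  have hperm : (PySem.Set.ofList keys).Perm first.keys := by
    rw [List.perm_ext_iff_of_nodup (PySem.Set.nodup_ofList _)
      (nodup_keys_foldl_insert _ _ (by simp [PySem.Dict.keys_empty]))]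
    intro a
    rw [PySem.Set.mem_ofList, hmem]
  have hpw : (PySem.Set.ofList keys).Pairwise
      (fun a b => first.getD a 0 < first.getD b 0) := by
    refine (ofList_pairwise_idxOf keys).imp_of_mem ?_
    intro a b ha hb hlt
    rw [hget a ((PySem.Set.mem_ofList _ _).1 ha), hget b ((PySem.Set.mem_ofList _ _).1 hb)]
    exact_mod_cast hlt
  rw [PySem.List.sorted_eq_of_perm_of_pairwise_lt first.keys (PySem.Set.ofList keys) _
      hperm hpw]
  rw [PySem.Set.ofList_eq_foldl, foldl_add_flatMap]
  rfl
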